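-- pv_equiv track=rewrite | github.com/MehradMi/Solo-Leveling-Task-Tracker | main.py | _init_class_stats
-- ===== SOURCE A (Python) =====
-- from typing import Dict, List, Optional, Tuple
--
-- def _init_class_stats(char_class: str) -> Dict[str, int]:
--     """Initialize stats based on character class"""
--     base_stats = {'strength': 10, 'intelligence': 10, 'agility': 10, 'focus': 10, 'creativity': 10}
--
--     class_bonuses = {
--         'Technomancer': {'intelligence': 5, 'focus': 3},
--         'Code Warrior': {'intelligence': 4, 'strength': 3, 'focus': 2},
--         'Data Wizard': {'intelligence': 6, 'creativity': 4},
--         'Cyber Knight': {'strength': 4, 'agility': 3, 'focus': 3},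
--         'Digital Assassin': {'agility': 5, 'intelligence': 3, 'focus': 2},
--         'System Admin': {'focus': 5, 'intelligence': 3, 'strength': 2}
--     }
--
--     if char_class in class_bonuses:
--         for stat, bonus in class_bonuses[char_class].items():
--             base_stats[stat] += bonus
--
--     return base_stats
-- ===== SOURCE B (Python) =====
-- def _init_class_stats(char_class: str):
--     """Initialize stats based on character class: explicit branch per class
--     returning the fully-computed stat dict (no base+bonus accumulation)."""
--     if char_class == 'Technomancer':
--         return {'strength': 10, 'intelligence': 15, 'agility': 10, 'focus': 13, 'creativity': 10}
--     elif char_class == 'Code Warrior':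
--         return {'strength': 13, 'intelligence': 14, 'agility': 10, 'focus': 12, 'creativity': 10}
--     elif char_class == 'Data Wizard':
--         return {'strength': 10, 'intelligence': 16, 'agility': 10, 'focus': 10, 'creativity': 14}
--     elif char_class == 'Cyber Knight':
--         return {'strength': 14, 'intelligence': 10, 'agility': 13, 'focus': 13, 'creativity': 10}
--     elif char_class == 'Digital Assassin':
--         return {'strength': 10, 'intelligence': 13, 'agility': 15, 'focus': 12, 'creativity': 10}
--     elif char_class == 'System Admin':
--         return {'strength': 12, 'intelligence': 13, 'agility': 10, 'focus': 15, 'creativity': 10}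
--     else:
--         return {'strength': 10, 'intelligence': 10, 'agility': 10, 'focus': 10, 'creativity': 10}
-- ===== Notes on version B (the rewrite author's own statement) =====
-- stated objective: simpler
-- what changed: Replaces the base-dict-plus-bonus-accumulation loop over a nested bonus table with a flat if/elif chain that returns each class's fully precomputed stat dict (fresh literal per call), removing the dicts-of-dicts and the per-stat addition.
import Mathlib
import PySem

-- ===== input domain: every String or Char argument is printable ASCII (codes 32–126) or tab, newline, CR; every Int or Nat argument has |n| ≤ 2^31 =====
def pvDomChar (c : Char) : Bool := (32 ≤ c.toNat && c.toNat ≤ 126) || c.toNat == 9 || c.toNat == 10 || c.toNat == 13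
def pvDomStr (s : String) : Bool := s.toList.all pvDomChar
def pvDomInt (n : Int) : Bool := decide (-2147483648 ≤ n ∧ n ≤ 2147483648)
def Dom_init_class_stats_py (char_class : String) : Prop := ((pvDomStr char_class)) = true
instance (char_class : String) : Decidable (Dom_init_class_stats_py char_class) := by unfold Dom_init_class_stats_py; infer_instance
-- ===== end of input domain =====

-- B replaces A's base-dict-plus-bonus-accumulation loop with a flat if/elif chain returning each class's precomputed stat dict (objective: simpler).
-- ===== PORT A =====
def init_class_stats_py (char_class : String) : List (String × Int) :=
  let base_stats : PySem.Dict String Int :=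
    PySem.Dict.ofList [("strength", 10), ("intelligence", 10), ("agility", 10), ("focus", 10), ("creativity", 10)]
  let class_bonuses : PySem.Dict String (PySem.Dict String Int) :=
    PySem.Dict.ofList
      [ ("Technomancer", PySem.Dict.ofList [("intelligence", 5), ("focus", 3)]),
        ("Code Warrior", PySem.Dict.ofList [("intelligence", 4), ("strength", 3), ("focus", 2)]),
        ("Data Wizard", PySem.Dict.ofList [("intelligence", 6), ("creativity", 4)]),
        ("Cyber Knight", PySem.Dict.ofList [("strength", 4), ("agility", 3), ("focus", 3)]),
        ("Digital Assassin", PySem.Dict.ofList [("agility", 5), ("intelligence", 3), ("focus", 2)]),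
        ("System Admin", PySem.Dict.ofList [("focus", 5), ("intelligence", 3), ("strength", 2)]) ]
  let final :=
    if class_bonuses.contains char_class then
      -- base_stats[stat] += bonus (every bonus key is present in base_stats, so no KeyError)
      ((class_bonuses.getD char_class PySem.Dict.empty).items).foldl
        (fun d p => d.insert p.1 (d.getD p.1 0 + p.2)) base_stats
    else base_stats
  final.items

-- ===== PORT B =====
def init_class_stats_py_alt (char_class : String) : List (String × Int) :=
  if char_class = "Technomancer" then
    [("strength", 10), ("intelligence", 15), ("agility", 10), ("focus", 13), ("creativity", 10)]
  else if char_class = "Code Warrior" then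
    [("strength", 13), ("intelligence", 14), ("agility", 10), ("focus", 12), ("creativity", 10)]
  else if char_class = "Data Wizard" then
    [("strength", 10), ("intelligence", 16), ("agility", 10), ("focus", 10), ("creativity", 14)]
  else if char_class = "Cyber Knight" then
    [("strength", 14), ("intelligence", 10), ("agility", 13), ("focus", 13), ("creativity", 10)]
  else if char_class = "Digital Assassin" then
    [("strength", 10), ("intelligence", 13), ("agility", 15), ("focus", 12), ("creativity", 10)]
  else if char_class = "System Admin" then
    [("strength", 12), ("intelligence", 13), ("agility", 10), ("focus", 15), ("creativity", 10)]
  else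
    [("strength", 10), ("intelligence", 10), ("agility", 10), ("focus", 10), ("creativity", 10)]

-- ===== PRECONDITION & SPEC =====
def Spec_init_class_stats_py (char_class : String) (out : List (String × Int)) : Prop := out = init_class_stats_py_alt char_class
instance (char_class : String) (out : List (String × Int)) : Decidable (Spec_init_class_stats_py char_class out) := by unfold Spec_init_class_stats_py; infer_instance

-- ===== CLAIM (what is proved, stated in full; the proofs are below) =====
def Claim_equal_init_class_stats_py : Prop := ∀ (char_class : String), Dom_init_class_stats_py char_class → Spec_init_class_stats_py char_class (init_class_stats_py char_class)

-- ===== LEMMAS AND PROOFS =====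

-- ===== VERDICT (by name: the statement is the Claim_ definition above) =====
theorem init_class_stats_py_spec : Claim_equal_init_class_stats_py := by
  intro c _
  unfold Spec_init_class_stats_py
  by_cases h1 : c = "Technomancer"; · subst h1; decide
  by_cases h2 : c = "Code Warrior"; · subst h2; decide
  by_cases h3 : c = "Data Wizard"; · subst h3; decide
  by_cases h4 : c = "Cyber Knight"; · subst h4; decide
  by_cases h5 : c = "Digital Assassin"; · subst h5; decide
  by_cases h6 : c = "System Admin"; · subst h6; decide
  simp [init_class_stats_py, init_class_stats_py_alt, PySem.Dict.ofList, PySem.Dict.update,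
    PySem.Dict.contains_insert, PySem.Dict.contains_empty, h1, h2, h3, h4, h5, h6]
  decide
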